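-- pv_equiv track=rewrite | github.com/tntpsu/duck-ops | runtime/shopify_seo_outcomes.py | _infer_issue_family_category
-- ===== SOURCE A (Python) =====
-- from typing import Any
--
-- CATEGORY_TARGET_ISSUES = {
--     "missing_title": {"missing_seo_title"},
--     "missing_description": {"missing_seo_description"},
--     "missing_title_and_description": {"missing_seo_title", "missing_seo_description"},
--     "long_title": {"long_seo_title"},
--     "long_description": {"long_seo_description"},
--     "short_title": {"short_seo_title"},
--     "duplicate_title": {"duplicate_seo_title"},
--     "near_duplicate_title": {"near_duplicate_seo_title"},
--     "weak_title": {"seo_title_matches_raw_title", "weak_generic_seo_title"},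
--     "weak_description": {"low_value_seo_copy", "weak_generic_seo_description"},
-- }
--
-- CATEGORY_LABELS = {
--     "missing_title": "Missing SEO titles",
--     "missing_description": "Missing SEO descriptions",
--     "missing_title_and_description": "Missing SEO titles + descriptions",
--     "long_title": "SEO titles too long",
--     "long_description": "SEO descriptions too long",
--     "short_title": "SEO titles too short",
--     "duplicate_title": "Duplicate SEO titles",
--     "near_duplicate_title": "Near-duplicate SEO titles",
--     "weak_title": "Weak SEO titles",
--     "weak_description": "Weak SEO descriptions",
-- }
--
-- def _normalize_text(value: Any) -> str:
--     return " ".join(str(value or "").strip().split())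
--
-- def _humanize_category(value: Any) -> str:
--     key = _normalize_text(value).lower()
--     if key in CATEGORY_LABELS:
--         return CATEGORY_LABELS[key]
--     text = key.replace("_", " ")
--     return text.title() if text else "SEO review"
--
-- def _infer_issue_family_category(target_issue_codes: list[str]) -> tuple[str | None, str | None]:
--     codes = {code for code in target_issue_codes if _normalize_text(code)}
--     if not codes:
--         return None, None
--     for category, expected in CATEGORY_TARGET_ISSUES.items():
--         if codes == set(expected):
--             return category, _humanize_category(category)
--     return None, None
-- ===== SOURCE B (Python) =====
-- # B: canonicalize the surviving codes to a sorted tuple and do one precomputed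
-- # dict lookup keyed by sorted tuples (every category's issue-set is distinct,
-- # so the mapping is injective and one lookup replaces the equality scan).
-- _LOOKUP = {
--     ("missing_seo_title",): ("missing_title", "Missing SEO titles"),
--     ("missing_seo_description",): ("missing_description", "Missing SEO descriptions"),
--     ("missing_seo_description", "missing_seo_title"): ("missing_title_and_description", "Missing SEO titles + descriptions"),
--     ("long_seo_title",): ("long_title", "SEO titles too long"),
--     ("long_seo_description",): ("long_description", "SEO descriptions too long"),
--     ("short_seo_title",): ("short_title", "SEO titles too short"),
--     ("duplicate_seo_title",): ("duplicate_title", "Duplicate SEO titles"),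
--     ("near_duplicate_seo_title",): ("near_duplicate_title", "Near-duplicate SEO titles"),
--     ("seo_title_matches_raw_title", "weak_generic_seo_title"): ("weak_title", "Weak SEO titles"),
--     ("low_value_seo_copy", "weak_generic_seo_description"): ("weak_description", "Weak SEO descriptions"),
-- }
--
-- def _infer_issue_family_category(target_issue_codes: list[str]) -> tuple[str | None, str | None]:
--     key = tuple(sorted({c for c in target_issue_codes if c.strip()}))
--     if not key:
--         return None, None
--     return _LOOKUP.get(key, (None, None))
-- ===== Notes on version B (the rewrite author's own statement) =====
-- stated objective: idiomatic
-- what changed: Replaces the per-call linear scan over CATEGORY_TARGET_ISSUES (set-equality test per category plus a _humanize_category recomputation of the label) by canonicalizing the surviving codes to a sorted tuple and doing one lookup in a precomputed dict keyed by sorted tuples with the labels stored alongside.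
import Mathlib
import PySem

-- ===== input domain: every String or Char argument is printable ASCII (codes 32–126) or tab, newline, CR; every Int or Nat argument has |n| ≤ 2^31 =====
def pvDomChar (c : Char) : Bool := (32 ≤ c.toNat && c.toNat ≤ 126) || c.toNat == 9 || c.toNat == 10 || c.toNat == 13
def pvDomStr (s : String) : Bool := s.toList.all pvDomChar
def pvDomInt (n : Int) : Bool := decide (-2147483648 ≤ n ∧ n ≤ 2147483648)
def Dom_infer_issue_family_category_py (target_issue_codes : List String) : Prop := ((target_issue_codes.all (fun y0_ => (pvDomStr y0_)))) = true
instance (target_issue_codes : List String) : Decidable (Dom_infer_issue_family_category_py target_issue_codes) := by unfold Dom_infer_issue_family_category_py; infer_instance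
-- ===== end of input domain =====

-- B replaces A's linear set-equality scan over CATEGORY_TARGET_ISSUES (and its _humanize_category
-- label recomputation) by canonicalizing the codes to a sorted tuple and one lookup in a
-- precomputed dict keyed by sorted tuples (objective: idiomatic; the issue-sets are distinct).

-- ===== PORT A =====
-- CATEGORY_TARGET_ISSUES as its items list (dict insertion order; values are Python sets)
def pvCategoryTargetIssues : List (String × PySem.Set String) :=
  [("missing_title", PySem.Set.ofList ["missing_seo_title"]),
   ("missing_description", PySem.Set.ofList ["missing_seo_description"]),
   ("missing_title_and_description", PySem.Set.ofList ["missing_seo_title", "missing_seo_description"]),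
   ("long_title", PySem.Set.ofList ["long_seo_title"]),
   ("long_description", PySem.Set.ofList ["long_seo_description"]),
   ("short_title", PySem.Set.ofList ["short_seo_title"]),
   ("duplicate_title", PySem.Set.ofList ["duplicate_seo_title"]),
   ("near_duplicate_title", PySem.Set.ofList ["near_duplicate_seo_title"]),
   ("weak_title", PySem.Set.ofList ["seo_title_matches_raw_title", "weak_generic_seo_title"]),
   ("weak_description", PySem.Set.ofList ["low_value_seo_copy", "weak_generic_seo_description"])]

def pvCategoryLabels : PySem.Dict String String :=
  PySem.Dict.ofList
    [("missing_title", "Missing SEO titles"),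
     ("missing_description", "Missing SEO descriptions"),
     ("missing_title_and_description", "Missing SEO titles + descriptions"),
     ("long_title", "SEO titles too long"),
     ("long_description", "SEO descriptions too long"),
     ("short_title", "SEO titles too short"),
     ("duplicate_title", "Duplicate SEO titles"),
     ("near_duplicate_title", "Near-duplicate SEO titles"),
     ("weak_title", "Weak SEO titles"),
     ("weak_description", "Weak SEO descriptions")]

-- _normalize_text on a str argument: 'str(value or "")' is the string itself (or "" for "",
-- and "".strip() = ""), so this is " ".join(value.strip().split())
def pvNormalizeText (value : String) : String :=
  PySem.Str.join " " (PySem.Str.split₀ (PySem.Str.strip value))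

-- str.title(), ported by hand (exact on the ASCII domain, where the cased characters are
-- exactly the alphabetic ones): a letter after a non-letter is uppercased, other letters lowered
def pvTitleGo : Bool → List Char → List Char
  | _, [] => []
  | prevCased, c :: cs =>
    (if PySem.Chars.isalpha c then
       (if prevCased then PySem.Chars.lowerChar c else PySem.Chars.upperChar c)
     else c) :: pvTitleGo (PySem.Chars.isalpha c) cs

def pvTitle (s : String) : String := String.ofList (pvTitleGo false s.toList)

def pvHumanizeCategory (value : String) : String :=
  let key := PySem.Str.lower (pvNormalizeText value)
  if pvCategoryLabels.contains key then pvCategoryLabels.getD key ""  -- key present, so CATEGORY_LABELS[key] = getD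
  else
    let text := PySem.Str.replace key "_" " "
    if text == "" then "SEO review" else pvTitle text

-- the 'for category, expected in CATEGORY_TARGET_ISSUES.items()' loop ('codes == set(expected)'
-- on a set argument is set equality with expected)
def pvInferLoop (codes : PySem.Set String) :
    List (String × PySem.Set String) → Option String × Option String
  | [] => (none, none)
  | (category, expected) :: rest =>
    if PySem.Set.equal codes expected then (some category, some (pvHumanizeCategory category))
    else pvInferLoop codes rest

def infer_issue_family_category_py (target_issue_codes : List String) : Option String × Option String :=
  -- {code for code in target_issue_codes if _normalize_text(code)} (truthiness = non-empty string)
  let codes := PySem.Set.ofList (target_issue_codes.filter (fun code => pvNormalizeText code != ""))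
  if codes.isEmpty then (none, none)
  else pvInferLoop codes pvCategoryTargetIssues

-- ===== PORT B =====
-- _LOOKUP: dict keyed by sorted tuples of issue codes, values (category, label)
def pvLookupB : PySem.Dict (List String) (String × String) :=
  PySem.Dict.ofList
    [(["missing_seo_title"], ("missing_title", "Missing SEO titles")),
     (["missing_seo_description"], ("missing_description", "Missing SEO descriptions")),
     (["missing_seo_description", "missing_seo_title"], ("missing_title_and_description", "Missing SEO titles + descriptions")),
     (["long_seo_title"], ("long_title", "SEO titles too long")),
     (["long_seo_description"], ("long_description", "SEO descriptions too long")),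
     (["short_seo_title"], ("short_title", "SEO titles too short")),
     (["duplicate_seo_title"], ("duplicate_title", "Duplicate SEO titles")),
     (["near_duplicate_seo_title"], ("near_duplicate_title", "Near-duplicate SEO titles")),
     (["seo_title_matches_raw_title", "weak_generic_seo_title"], ("weak_title", "Weak SEO titles")),
     (["low_value_seo_copy", "weak_generic_seo_description"], ("weak_description", "Weak SEO descriptions"))]

def infer_issue_family_category_py_alt (target_issue_codes : List String) : Option String × Option String :=
  -- key = tuple(sorted({c for c in target_issue_codes if c.strip()})) — sorted of a set with no
  -- key on distinct strings is order-exact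
  let key := PySem.List.sorted (PySem.Set.ofList (target_issue_codes.filter (fun c => PySem.Str.strip c != ""))) (fun x => x) false
  -- if not key: return None, None
  if key = [] then (none, none)
  else
    -- return _LOOKUP.get(key, (None, None))
    match pvLookupB.get? key with
    | some v => (some v.1, some v.2)
    | none => (none, none)

-- ===== PRECONDITION & SPEC =====
def Spec_infer_issue_family_category_py (target_issue_codes : List String) (out : Option String × Option String) : Prop := out = infer_issue_family_category_py_alt target_issue_codes
instance (target_issue_codes : List String) (out : Option String × Option String) : Decidable (Spec_infer_issue_family_category_py target_issue_codes out) := by unfold Spec_infer_issue_family_category_py; infer_instance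

-- ===== CLAIM (what is proved, stated in full; the proofs are below) =====
def Claim_equal_infer_issue_family_category_py : Prop := ∀ (target_issue_codes : List String), Dom_infer_issue_family_category_py target_issue_codes → Spec_infer_issue_family_category_py target_issue_codes (infer_issue_family_category_py target_issue_codes)

-- ===== LEMMAS AND PROOFS =====

-- split₀'s worker yields [] exactly on an all-whitespace remainder with empty accumulators
lemma go_nil_iff : ∀ (t : List Char) (cur : List Char) (acc : List (List Char)),
    PySem.Chars.split₀.go t cur acc = [] ↔ acc = [] ∧ cur = [] ∧ t.all PySem.Chars.isspace = true := by
  intro t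
  induction t with
  | nil =>
    intro cur acc
    simp [PySem.Chars.split₀.go, List.isEmpty_iff]
    by_cases h : cur = [] <;> simp [h]
  | cons c rest ih =>
    intro cur acc
    simp only [PySem.Chars.split₀.go]
    by_cases hc : PySem.Chars.isspace c
    · by_cases hcur : cur = []
      · simp [hc, hcur, ih]
      · simp [hc, hcur, List.isEmpty_iff, ih]
    · simp [hc, ih]

lemma go_words_ne_nil : ∀ (t : List Char) (cur : List Char) (acc : List (List Char)),
    (∀ w ∈ acc, w ≠ []) → ∀ w ∈ PySem.Chars.split₀.go t cur acc, w ≠ [] := by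
  intro t
  induction t with
  | nil =>
    intro cur acc hacc w hw
    simp only [PySem.Chars.split₀.go] at hw
    by_cases hcur : cur = []
    · simp [hcur] at hw
      exact hacc w hw
    · simp [List.isEmpty_iff, hcur] at hw
      rcases hw with h | h
      · exact hacc w h
      · subst h; simpa using hcur
  | cons c rest ih =>
    intro cur acc hacc w hw
    simp only [PySem.Chars.split₀.go] at hw
    by_cases hc : PySem.Chars.isspace c
    · by_cases hcur : cur = []
      · simp [hc, hcur] at hw
        exact ih [] acc hacc w hw
      · simp [hc, List.isEmpty_iff, hcur] at hw
        refine ih [] _ ?_ w hw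
        intro w' hw'
        rcases List.mem_cons.mp hw' with h | h
        · subst h; simpa using hcur
        · exact hacc w' h
    · simp [hc] at hw
      exact ih (c :: cur) acc hacc w hw

lemma strip_ne_nil_not_all (t : List Char) (h : PySem.Chars.strip t ≠ []) :
    ¬ (PySem.Chars.strip t).all PySem.Chars.isspace = true := by
  intro hall
  have hpre : PySem.Chars.strip t <+: PySem.Chars.lstrip t := by
    unfold PySem.Chars.strip PySem.Chars.rstrip
    have hsuf := List.dropWhile_suffix (l := (PySem.Chars.lstrip t).reverse) PySem.Chars.isspace
    simpa using hsuf.reverse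
  rcases hst : PySem.Chars.strip t with _ | ⟨x, l'⟩
  · exact h hst
  · obtain ⟨s', hs'⟩ := hpre
    rw [hst] at hs'
    have hxspace : PySem.Chars.isspace x = true := by
      rw [hst] at hall
      simp [List.all_cons] at hall
      exact hall.1
    have hdw : List.dropWhile PySem.Chars.isspace t = x :: (l' ++ s') := by
      have : PySem.Chars.lstrip t = x :: (l' ++ s') := by simpa using hs'.symm
      simpa [PySem.Chars.lstrip] using this
    have h2 := List.head_dropWhile_not PySem.Chars.isspace (l := t) (by simp [hdw])
    simp [hdw, hxspace] at h2

lemma join_split_nil_iff (t : List Char) :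
    PySem.Chars.join [' '] (PySem.Chars.split₀ t) = [] ↔ PySem.Chars.split₀ t = [] := by
  constructor
  · intro h
    rcases hs : PySem.Chars.split₀ t with _ | ⟨w, rest⟩
    · rfl
    · exfalso
      have hw : w ≠ [] := by
        refine go_words_ne_nil t [] [] (by simp) w ?_
        rw [show PySem.Chars.split₀.go t [] [] = PySem.Chars.split₀ t from rfl, hs]; simp
      rw [hs] at h
      rcases rest with _ | ⟨w2, rest'⟩
      · simp [PySem.Chars.join, List.intercalate] at h
        exact hw h
      · simp [PySem.Chars.join, List.intercalate] at h
  · intro h; rw [h]; simp [PySem.Chars.join, List.intercalate]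

lemma pvFilterCond (c : String) :
    (PySem.Str.join " " (PySem.Str.split₀ (PySem.Str.strip c)) != "") = (PySem.Str.strip c != "") := by
  have key : (PySem.Str.join " " (PySem.Str.split₀ (PySem.Str.strip c)) = "") ↔ (PySem.Str.strip c = "") := by
    rw [← String.toList_inj, ← String.toList_inj]
    simp only [PySem.Str.toList_join, PySem.Str.split₀_map_toList, PySem.Str.toList_strip]
    show PySem.Chars.join [' '] (PySem.Chars.split₀ (PySem.Chars.strip c.toList)) = [] ↔ _
    rw [join_split_nil_iff]
    constructor
    · intro h
      have hgo := (go_nil_iff (PySem.Chars.strip c.toList) [] []).mp h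
      by_contra hne
      exact strip_ne_nil_not_all _ (by simpa using hne) hgo.2.2
    · intro h
      rw [show PySem.Chars.strip c.toList = ([] : List Char) from h]
      rfl
  by_cases h : PySem.Str.strip c = ""
  · rw [key.mpr h, h]
  · simp [bne, h, (not_iff_not.mpr key).mpr h]

-- the filter conditions of A ('_normalize_text(code)' truthy) and B ('c.strip()' truthy) agree
lemma pvFilterCondEq (c : String) : (pvNormalizeText c != "") = (PySem.Str.strip c != "") := by
  unfold pvNormalizeText
  exact pvFilterCond c

-- Python set equality of two nodup lists is equality of their sorted canonical forms
lemma pvEqualIffSorted (codes E : List String) (hn : codes.Nodup) (hE : E.Nodup) :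
    PySem.Set.equal codes E = true ↔
      PySem.List.sorted codes (fun x => x) false = PySem.List.sorted E (fun x => x) false := by
  rw [PySem.List.sorted_id_eq_sorted_id_iff_perm, PySem.Set.equal_iff,
    List.perm_ext_iff_of_nodup hn hE]

-- A's equality scan equals B's sorted-key dict lookup, per target set (the sorted form of each
-- of the 10 issue-sets is the corresponding key of pvLookupB)
set_option maxHeartbeats 4000000 in
lemma pvLoopLookup (codes : List String) (hn : codes.Nodup) :
    pvInferLoop codes pvCategoryTargetIssues =
      (match pvLookupB.get? (PySem.List.sorted codes (fun x => x) false) with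
       | some v => (some v.1, some v.2)
       | none => (none, none)) := by
  have heq : ∀ E k : List String, E.Nodup →
      PySem.List.sorted E (fun x => x) false = k →
      PySem.Set.equal codes E = (k == PySem.List.sorted codes (fun x => x) false) := by
    intro E k hE hk
    by_cases h : PySem.List.sorted codes (fun x => x) false = k
    · simp [h, (pvEqualIffSorted codes E hn hE).mpr (h.trans hk.symm)]
    · have : ¬ PySem.Set.equal codes E = true := fun hc =>
        h (((pvEqualIffSorted codes E hn hE).mp hc).trans hk)
      simp only [Bool.not_eq_true] at this
      simp [this]
      exact fun hh => h hh.symm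
  have hmk : pvLookupB = PySem.Dict.mk
    [(["missing_seo_title"], ("missing_title", "Missing SEO titles")),
     (["missing_seo_description"], ("missing_description", "Missing SEO descriptions")),
     (["missing_seo_description", "missing_seo_title"], ("missing_title_and_description", "Missing SEO titles + descriptions")),
     (["long_seo_title"], ("long_title", "SEO titles too long")),
     (["long_seo_description"], ("long_description", "SEO descriptions too long")),
     (["short_seo_title"], ("short_title", "SEO titles too short")),
     (["duplicate_seo_title"], ("duplicate_title", "Duplicate SEO titles")),
     (["near_duplicate_seo_title"], ("near_duplicate_title", "Near-duplicate SEO titles")),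
     (["seo_title_matches_raw_title", "weak_generic_seo_title"], ("weak_title", "Weak SEO titles")),
     (["low_value_seo_copy", "weak_generic_seo_description"], ("weak_description", "Weak SEO descriptions"))] := by decide
  simp only [pvCategoryTargetIssues, pvInferLoop,
    heq (PySem.Set.ofList ["missing_seo_title"]) ["missing_seo_title"] (by decide)
      (by apply PySem.List.sorted_eq_of_perm_of_pairwise_lt <;> decide),
    heq (PySem.Set.ofList ["missing_seo_description"]) ["missing_seo_description"] (by decide)
      (by apply PySem.List.sorted_eq_of_perm_of_pairwise_lt <;> decide),
    heq (PySem.Set.ofList ["missing_seo_title", "missing_seo_description"]) ["missing_seo_description", "missing_seo_title"] (by decide)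
      (by apply PySem.List.sorted_eq_of_perm_of_pairwise_lt <;> first | decide | (simp [String.lt_iff_toList_lt]; decide)),
    heq (PySem.Set.ofList ["long_seo_title"]) ["long_seo_title"] (by decide)
      (by apply PySem.List.sorted_eq_of_perm_of_pairwise_lt <;> decide),
    heq (PySem.Set.ofList ["long_seo_description"]) ["long_seo_description"] (by decide)
      (by apply PySem.List.sorted_eq_of_perm_of_pairwise_lt <;> decide),
    heq (PySem.Set.ofList ["short_seo_title"]) ["short_seo_title"] (by decide)
      (by apply PySem.List.sorted_eq_of_perm_of_pairwise_lt <;> decide),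
    heq (PySem.Set.ofList ["duplicate_seo_title"]) ["duplicate_seo_title"] (by decide)
      (by apply PySem.List.sorted_eq_of_perm_of_pairwise_lt <;> decide),
    heq (PySem.Set.ofList ["near_duplicate_seo_title"]) ["near_duplicate_seo_title"] (by decide)
      (by apply PySem.List.sorted_eq_of_perm_of_pairwise_lt <;> decide),
    heq (PySem.Set.ofList ["seo_title_matches_raw_title", "weak_generic_seo_title"]) ["seo_title_matches_raw_title", "weak_generic_seo_title"] (by decide)
      (by apply PySem.List.sorted_eq_of_perm_of_pairwise_lt <;> first | decide | (simp [String.lt_iff_toList_lt]; decide)),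
    heq (PySem.Set.ofList ["low_value_seo_copy", "weak_generic_seo_description"]) ["low_value_seo_copy", "weak_generic_seo_description"] (by decide)
      (by apply PySem.List.sorted_eq_of_perm_of_pairwise_lt <;> first | decide | (simp [String.lt_iff_toList_lt]; decide))]
  rw [hmk, PySem.Dict.get?_mk_cons, PySem.Dict.get?_mk_cons, PySem.Dict.get?_mk_cons,
    PySem.Dict.get?_mk_cons, PySem.Dict.get?_mk_cons, PySem.Dict.get?_mk_cons,
    PySem.Dict.get?_mk_cons, PySem.Dict.get?_mk_cons, PySem.Dict.get?_mk_cons,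
    PySem.Dict.get?_mk_cons]
  simp only [beq_iff_eq]
  split_ifs <;> rfl

-- ===== VERDICT (by name: the statement is the Claim_ definition above) =====
theorem infer_issue_family_category_py_spec : Claim_equal_infer_issue_family_category_py := by
  intro xs _
  unfold Spec_infer_issue_family_category_py infer_issue_family_category_py
    infer_issue_family_category_py_alt
  rw [List.filter_congr (fun c _ => pvFilterCondEq c)]
  set codes := PySem.Set.ofList (List.filter (fun c => PySem.Str.strip c != "") xs) with hc
  have hn : codes.Nodup := PySem.Set.nodup_ofList _
  have hkey : (PySem.List.sorted codes (fun x => x) false = []) ↔ codes.isEmpty = true := by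
    rw [PySem.List.sorted_eq_nil_iff, List.isEmpty_iff]
  by_cases h : codes.isEmpty = true
  · simp only [h, if_pos (hkey.mpr h), if_true]
  · simp only [h, if_neg (fun hh => h (hkey.mp hh))]
    exact pvLoopLookup codes hn
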